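-- pv_equiv track=rewrite | github.com/lebiraja/meta_hack | train/action_parser.py | _preprocess_json
-- ===== SOURCE A (Python) =====
-- def _preprocess_json(s: str) -> str:
--     """
--     One-pass pre-processing before json.loads():
--     1. Strip Python-style # comments outside string values
--     2. Escape literal control characters (newlines, tabs) inside string values
--
--     Handles two common model failure modes observed in v4 training:
--     - "Invalid control character": model writes literal \\n inside a JSON string
--     - "Expecting ',' delimiter": model appends # comment after a field value
--     """
--     result = []
--     in_string = False
--     i = 0
--     while i < len(s):
--         ch = s[i]
--         # Handle escape sequences inside strings — pass through unchanged
--         if ch == "\\" and in_string: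
--             result.append(ch)
--             i += 1
--             if i < len(s):
--                 result.append(s[i])
--                 i += 1
--             continue
--         # Toggle string mode on unescaped double-quote
--         if ch == '"':
--             in_string = not in_string
--             result.append(ch)
--         elif in_string:
--             # Inside a string: escape control characters that JSON forbids as literals
--             if ch == "\n":
--                 result.append("\\n")
--             elif ch == "\r":
--                 result.append("\\r")
--             elif ch == "\t":
--                 result.append("\\t")
--             elif ord(ch) < 0x20:
--                 result.append(f"\\u{ord(ch):04x}")
--             else:
--                 result.append(ch)
--         elif ch == "#":
--             # Outside a string: Python comment — skip to end of line
--             while i < len(s) and s[i] != "\n":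
--                 i += 1
--             continue
--         else:
--             result.append(ch)
--         i += 1
--     return "".join(result)
-- ===== SOURCE B (Python) =====
-- _CTRL = {i: "\\u%04x" % i for i in range(0x20)}
-- _CTRL[0x09] = "\\t"
-- _CTRL[0x0a] = "\\n"
-- _CTRL[0x0d] = "\\r"
--
--
-- def _escape_ctrl(chunk: str) -> str:
--     # JSON-escape literal control characters in a quote/backslash-free chunk.
--     if chunk and min(chunk) < " ":
--         return chunk.translate(_CTRL)
--     return chunk
--
--
-- def _preprocess_json(s: str) -> str:
--     # Chunk-wise scanner: jump between delimiters with str.find and copy whole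
--     # slices instead of stepping one character at a time.
--     out = []
--     i, n = 0, len(s)
--     in_string = False
--     while i < n:
--         if not in_string:
--             q = s.find('"', i)
--             h = s.find('#', i, q if q != -1 else n)
--             k = h if h != -1 else (q if q != -1 else n)
--             out.append(s[i:k])
--             if k == n:
--                 break
--             if s[k] == '"':
--                 out.append('"')
--                 in_string = True
--                 i = k + 1
--             else:
--                 nl = s.find('\n', k)
--                 i = n if nl == -1 else nl  # keep the newline; it ends the comment
--         else:
--             q = s.find('"', i)
--             b = s.find('\\', i, q if q != -1 else n)
--             k = b if b != -1 else (q if q != -1 else n)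
--             out.append(_escape_ctrl(s[i:k]))
--             if k == n:
--                 break
--             if s[k] == '"':
--                 out.append('"')
--                 in_string = False
--                 i = k + 1
--             else:
--                 out.append(s[k:k + 2])  # escape sequence (or lone trailing backslash)
--                 i = k + 2
--     return "".join(out)
-- ===== Notes on version B (the rewrite author's own statement) =====
-- stated objective: faster
-- what changed: Replaces A's character-by-character state machine with a chunk-wise scanner: str.find jumps straight to the next delimiter ('"', '#', '\', '\n') and whole slices are copied (and, inside strings, escaped only when a min() scan sees a control character), instead of appending one character per loop iteration.
import Mathlib
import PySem

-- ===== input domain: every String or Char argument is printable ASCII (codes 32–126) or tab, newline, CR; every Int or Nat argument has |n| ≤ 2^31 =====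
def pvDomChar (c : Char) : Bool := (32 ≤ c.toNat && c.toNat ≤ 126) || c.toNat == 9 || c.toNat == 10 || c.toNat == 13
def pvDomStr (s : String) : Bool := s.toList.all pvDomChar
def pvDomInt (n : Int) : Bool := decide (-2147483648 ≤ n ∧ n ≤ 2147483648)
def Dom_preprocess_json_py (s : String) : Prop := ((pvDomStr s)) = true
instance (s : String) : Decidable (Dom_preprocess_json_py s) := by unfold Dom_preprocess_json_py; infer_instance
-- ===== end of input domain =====

-- ===== PORT A =====
-- B is a chunk-wise rewrite of A's char-by-char state machine; return values proved equal.

-- shared formatting helper: one hex digit (used by both Pythons' "%04x"/f"{:04x}")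
def pvHexDigit (m : Nat) : Char :=
  if m < 10 then Char.ofNat (48 + m) else Char.ofNat (87 + m)

-- f"\\u{n:04x}" for n < 0x20 (both sides only apply it there): "\u00" ++ two hex digits
def pvU4 (n : Nat) : List Char :=
  ['\\', 'u', '0', '0', pvHexDigit (n / 16), pvHexDigit (n % 16)]

-- A's inner in-string branch chain (the elif ladder on ch)
def pvEscA (c : Char) : List Char :=
  if c = '\n' then ['\\', 'n']
  else if c = '\r' then ['\\', 'r']
  else if c = '\t' then ['\\', 't']
  else if c.toNat < 32 then pvU4 c.toNat
  else [c]

-- A's while-loop, index i ↦ the remaining suffix of the char list, state = in_string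
def pvGoA (l : List Char) (inS : Bool) : List Char :=
  match l with
  | [] => []
  | c :: rest =>
    if c = '\\' ∧ inS = true then
      match rest with
      | [] => ['\\']
      | c2 :: rest2 => '\\' :: c2 :: pvGoA rest2 inS
    else if c = '"' then c :: pvGoA rest (!inS)
    else if inS then pvEscA c ++ pvGoA rest inS
    else if c = '#' then pvGoA (rest.dropWhile (fun x => x ≠ '\n')) inS
    else c :: pvGoA rest inS
termination_by l.length
decreasing_by
all_goals
  first
  | (simp <;> omega)
  | (have h1 := List.length_dropWhile_le (fun x : Char => decide (x ≠ '\n')) rest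
     simp at h1 ⊢; omega)

-- ===== PORT B =====
-- _CTRL.get(ord(c), c) of Source B (the dict maps every code < 0x20; 9/10/13 overridden)
def pvEscB (c : Char) : List Char :=
  if c.toNat = 9 then ['\\', 't']
  else if c.toNat = 10 then ['\\', 'n']
  else if c.toNat = 13 then ['\\', 'r']
  else if c.toNat < 32 then pvU4 c.toNat
  else [c]

-- Source B's _escape_ctrl: `if chunk and min(chunk) < " ": chunk.translate(_CTRL)`
def pvEscCtrl (cs : List Char) : List Char :=
  match PySem.List.min? cs (fun c => c) with
  | none => cs
  | some m => if m < ' ' then cs.flatMap pvEscB else cs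

-- outside a string, Source B scans to the first '"' or '#' (find + min over the two hits)
def pvOutP (c : Char) : Bool := c ≠ '"' && c ≠ '#'
-- inside a string, to the first '"' or '\'
def pvInP (c : Char) : Bool := c ≠ '"' && c ≠ '\\'

-- Source B's while-loop: one iteration handles a whole chunk s[i:k] plus the delimiter at k
def pvGoB (l : List Char) (inS : Bool) : List Char :=
  if inS then
    match _h : l.dropWhile pvInP with
    | [] => pvEscCtrl (l.takeWhile pvInP)                       -- k == n: append and break
    | c :: rest' =>
      pvEscCtrl (l.takeWhile pvInP) ++
        (if c = '"' then '"' :: pvGoB rest' false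
         else match rest' with                                   -- backslash: copy s[k:k+2]
           | [] => ['\\']
           | c2 :: rest2 => '\\' :: c2 :: pvGoB rest2 true)
  else
    match _h : l.dropWhile pvOutP with
    | [] => l.takeWhile pvOutP                                   -- k == n: append and break
    | c :: rest' =>
      l.takeWhile pvOutP ++
        (if c = '"' then '"' :: pvGoB rest' true
         else pvGoB (rest'.dropWhile (fun x => x ≠ '\n')) false) -- '#': jump to the newline
termination_by l.length
decreasing_by
all_goals
  first
  | (have h1 := List.length_dropWhile_le pvInP l
     rw [_h] at h1; simp at h1 ⊢; omega)
  | (have h1 := List.length_dropWhile_le pvOutP l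
     rw [_h] at h1; simp at h1 ⊢; omega)
  | (have h1 := List.length_dropWhile_le pvOutP l
     have h2 := List.length_dropWhile_le (fun x : Char => decide (x ≠ '\n')) rest'
     rw [_h] at h1; simp at h1 h2 ⊢; omega)

def preprocess_json_py (s : String) : String := String.ofList (pvGoA s.toList false)

def preprocess_json_py_alt (s : String) : String := String.ofList (pvGoB s.toList false)

-- ===== PRECONDITION & SPEC =====
def Spec_preprocess_json_py (s : String) (out : String) : Prop := out = preprocess_json_py_alt s
instance (s : String) (out : String) : Decidable (Spec_preprocess_json_py s out) := by unfold Spec_preprocess_json_py; infer_instance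

-- ===== CLAIM (what is proved, stated in full; the proofs are below) =====
def Claim_equal_preprocess_json_py : Prop := ∀ (s : String), Dom_preprocess_json_py s → Spec_preprocess_json_py s (preprocess_json_py s)

-- ===== LEMMAS AND PROOFS =====

theorem pvCharEqOfToNat {c d : Char} (h : c.toNat = d.toNat) : c = d :=
  Char.ext (UInt32.toNat_inj.mp h)

theorem pvEscA_eq_pvEscB (c : Char) : pvEscA c = pvEscB c := by
  unfold pvEscA pvEscB
  by_cases h10 : c.toNat = 10
  · have : c = '\n' := pvCharEqOfToNat h10
    subst this; decide
  by_cases h13 : c.toNat = 13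
  · have : c = '\r' := pvCharEqOfToNat h13
    subst this; decide
  by_cases h9 : c.toNat = 9
  · have : c = '\t' := pvCharEqOfToNat h9
    subst this; decide
  have hn : c ≠ '\n' := fun h => h10 (by subst h; rfl)
  have hr : c ≠ '\r' := fun h => h13 (by subst h; rfl)
  have ht : c ≠ '\t' := fun h => h9 (by subst h; rfl)
  simp [hn, hr, ht, h9, h10, h13]

theorem pvFlatMap_id_of {cs : List Char} (h : ∀ c ∈ cs, pvEscB c = [c]) :
    cs.flatMap pvEscB = cs := by
  induction cs with
  | nil => rfl
  | cons c t ih =>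
    simp only [List.flatMap_cons]
    rw [h c (by simp), ih (fun d hd => h d (by simp [hd]))]
    rfl

theorem pvEscCtrl_eq (cs : List Char) : pvEscCtrl cs = cs.flatMap pvEscB := by
  unfold pvEscCtrl
  cases hm : PySem.List.min? cs (fun c => c) with
  | none =>
    rw [(PySem.List.min?_eq_none_iff cs _).mp hm]; rfl
  | some m =>
    by_cases hlt : m < ' '
    · simp [hlt]
    · simp only [hlt, if_false]
      refine (pvFlatMap_id_of ?_).symm
      intro c hc
      have hmc : m ≤ c := PySem.List.min?_isMin hm c hc
      have h32 : 32 ≤ c.toNat := by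
        have h1 : ' ' ≤ m := le_of_not_gt hlt
        have h2 : ' ' ≤ c := le_trans h1 hmc
        have := (Char.le_def.mp h2)
        have := UInt32.le_iff_toNat_le.mp this
        simpa using this
      unfold pvEscB
      rw [if_neg (by omega), if_neg (by omega), if_neg (by omega), if_neg (by omega)]

theorem pvGoA_out_chunk (chunk rest : List Char)
    (h : ∀ c ∈ chunk, c ≠ '"' ∧ c ≠ '#') :
    pvGoA (chunk ++ rest) false = chunk ++ pvGoA rest false := by
  induction chunk with
  | nil => rfl
  | cons c t ih =>
    have hc := h c (by simp)
    rw [List.cons_append, pvGoA.eq_def]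
    simp only [Bool.false_eq_true, and_false, if_false, hc.1, hc.2, if_false,
      Bool.false_eq_true]
    rw [ih (fun d hd => h d (by simp [hd]))]
    rfl

theorem pvGoA_in_chunk (chunk rest : List Char)
    (h : ∀ c ∈ chunk, c ≠ '"' ∧ c ≠ '\\') :
    pvGoA (chunk ++ rest) true = chunk.flatMap pvEscA ++ pvGoA rest true := by
  induction chunk with
  | nil => rfl
  | cons c t ih =>
    have hc := h c (by simp)
    rw [List.cons_append, pvGoA.eq_def]
    simp only [hc.1, hc.2, false_and, if_false, if_true]
    rw [ih (fun d hd => h d (by simp [hd]))]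
    simp

theorem pvDropWhile_head_false {p : Char → Bool} {l : List Char} {c : Char} {r : List Char}
    (h : l.dropWhile p = c :: r) : p c = false := by
  have h2 := List.head_dropWhile_not p (l := l) (by simp [h])
  simp only [h, List.head_cons] at h2
  exact h2

theorem pvGoB_false_eq (l : List Char) :
    pvGoB l false = (match l.dropWhile pvOutP with
      | [] => l.takeWhile pvOutP
      | c :: rest' =>
        l.takeWhile pvOutP ++
          (if c = '"' then '"' :: pvGoB rest' true
           else pvGoB (rest'.dropWhile (fun x => x ≠ '\n')) false)) := by
  rw [pvGoB.eq_def]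
  simp only [Bool.false_eq_true, if_false]
  split <;> rename_i heq <;> simp only [heq]

theorem pvGoB_true_eq (l : List Char) :
    pvGoB l true = (match l.dropWhile pvInP with
      | [] => pvEscCtrl (l.takeWhile pvInP)
      | c :: rest' =>
        pvEscCtrl (l.takeWhile pvInP) ++
          (if c = '"' then '"' :: pvGoB rest' false
           else match rest' with
             | [] => ['\\']
             | c2 :: rest2 => '\\' :: c2 :: pvGoB rest2 true)) := by
  rw [pvGoB.eq_def]
  simp only [if_true]
  split
  · rename_i heq; simp only [heq]
  · rename_i c r heq
    simp only [heq]
    by_cases hc : c = '"'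
    · simp [hc]
    · simp only [hc, if_false]
      cases r <;> rfl

theorem pvGo_eq : ∀ (n : Nat) (l : List Char) (inS : Bool),
    l.length ≤ n → pvGoA l inS = pvGoB l inS := by
  intro n
  induction n with
  | zero =>
    intro l inS h
    have hl : l = [] := by cases l with
      | nil => rfl
      | cons a t => simp at h
    subst hl
    cases inS <;> simp [pvGoA.eq_def, pvGoB.eq_def, pvEscCtrl, PySem.List.min?]
  | succ n ih =>
    intro l inS hlen
    cases inS with
    | false =>
      have hsplit := List.takeWhile_append_dropWhile (p := pvOutP) (l := l)
      cases hdrop : l.dropWhile pvOutP with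
      | nil =>
        have hA : pvGoA l false = l.takeWhile pvOutP := by
          conv_lhs => rw [← hsplit, hdrop]
          rw [pvGoA_out_chunk _ _ (fun c hc => by
            have := List.mem_takeWhile_imp hc
            simp [pvOutP] at this; exact this)]
          simp [pvGoA.eq_def]
        rw [hA, pvGoB_false_eq]
        simp [hdrop]
      | cons c rest' =>
        have hmem : ∀ d ∈ l.takeWhile pvOutP, d ≠ '"' ∧ d ≠ '#' := fun d hd => by
          have := List.mem_takeWhile_imp hd
          simp [pvOutP] at this; exact this
        have hA : pvGoA l false = l.takeWhile pvOutP ++ pvGoA (c :: rest') false := by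
          conv_lhs => rw [← hsplit, hdrop]
          exact pvGoA_out_chunk _ _ hmem
        have hlen' : rest'.length ≤ n := by
          have := congrArg List.length hsplit
          rw [hdrop] at this
          simp [List.length_append] at this
          omega
        have hpc := pvDropWhile_head_false hdrop
        simp only [pvOutP, Bool.and_eq_false_iff] at hpc
        rw [hA, pvGoB_false_eq]
        simp only [hdrop]
        rcases hpc with hq | hh
        · have hq' : c = '"' := by simpa using hq
          subst hq'
          rw [pvGoA.eq_def]
          simp only [if_true]
          have : ¬('"' = '\\' ∧ False) := by simp
          simp only [Bool.false_eq_true, and_false, if_false, Bool.not_false]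
          rw [ih rest' true hlen']
        · have hh' : c = '#' := by simpa using hh
          subst hh'
          have hne : ¬('#' = '"') := by decide
          rw [pvGoA.eq_def]
          simp only [Bool.false_eq_true, and_false, if_false, hne, if_true]
          have hd2 : (rest'.dropWhile (fun x => x ≠ '\n')).length ≤ n := by
            have := List.length_dropWhile_le (fun x => decide (x ≠ '\n')) rest'
            simp at this ⊢
            omega
          rw [ih _ false hd2]
    | true =>
      have hsplit := List.takeWhile_append_dropWhile (p := pvInP) (l := l)
      cases hdrop : l.dropWhile pvInP with
      | nil =>
        have hA : pvGoA l true = (l.takeWhile pvInP).flatMap pvEscA := by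
          conv_lhs => rw [← hsplit, hdrop]
          rw [pvGoA_in_chunk _ _ (fun c hc => by
            have := List.mem_takeWhile_imp hc
            simp [pvInP] at this; exact this)]
          simp [pvGoA.eq_def]
        rw [hA, pvGoB_true_eq]
        simp only [hdrop]
        rw [pvEscCtrl_eq]
        rw [funext pvEscA_eq_pvEscB]
      | cons c rest' =>
        have hmem : ∀ d ∈ l.takeWhile pvInP, d ≠ '"' ∧ d ≠ '\\' := fun d hd => by
          have := List.mem_takeWhile_imp hd
          simp [pvInP] at this; exact this
        have hA : pvGoA l true = (l.takeWhile pvInP).flatMap pvEscA ++ pvGoA (c :: rest') true := by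
          conv_lhs => rw [← hsplit, hdrop]
          exact pvGoA_in_chunk _ _ hmem
        have hlen' : rest'.length ≤ n := by
          have := congrArg List.length hsplit
          rw [hdrop] at this
          simp [List.length_append] at this
          omega
        have hpc := pvDropWhile_head_false hdrop
        simp only [pvInP, Bool.and_eq_false_iff] at hpc
        rw [hA, pvGoB_true_eq]
        simp only [hdrop]
        rw [pvEscCtrl_eq, funext pvEscA_eq_pvEscB]
        rcases hpc with hq | hb
        · have hq' : c = '"' := by simpa using hq
          subst hq'
          have : ¬('"' = '\\') := by decide
          rw [pvGoA.eq_def]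
          simp only [this, false_and, if_false, if_true, Bool.not_true]
          rw [ih rest' false hlen']
        · have hb' : c = '\\' := by simpa using hb
          subst hb'
          have hne : ¬('\\' = '"') := by decide
          rw [pvGoA.eq_def]
          simp only [and_true, if_true, hne, if_false]
          cases rest' with
          | nil => rfl
          | cons c2 rest2 =>
            have h2 : rest2.length ≤ n := by
              simp at hlen'; omega
            simp only []
            rw [ih rest2 true h2]

-- ===== VERDICT (by name: the statement is the Claim_ definition above) =====
theorem preprocess_json_py_spec : Claim_equal_preprocess_json_py := by
  intro s _
  unfold Spec_preprocess_json_py preprocess_json_py preprocess_json_py_alt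
  exact congrArg String.ofList (pvGo_eq s.toList.length s.toList false le_rfl)
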